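-- pv_equiv track=rewrite | github.com/willis0342/rdm | rdm/audit_for_gaps.py | _find_failing_checklist_items
-- ===== SOURCE A (Python) =====
-- def _find_failing_checklist_items(source_generator, checklist):
--     checklist_keys = set(_extract_keys_from_checklist(checklist))
--     found_keys = set(_find_keys_in_sources(source_generator, checklist_keys))
--     missing_keys = checklist_keys.difference(found_keys)
--     for item in checklist:
--         reference = item.get('reference')
--         if reference and reference in missing_keys:
--             yield item
--
-- def _extract_keys_from_checklist(checklist):
--     for item in checklist:
--         key = item.get('reference')
--         if key:
--             yield key
--
-- def _find_keys_in_sources(source_generator, checklist_keys):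
--     for content in source_generator:
--         yield from _find_keys_in_content(content, checklist_keys)
--
-- def _find_keys_in_content(content, checklist_keys):
--     for key in checklist_keys:
--         if key in content:
--             yield key
-- ===== SOURCE B (Python) =====
-- def _find_failing_checklist_items(source_generator, checklist):
--     # One pass over the checklist: each distinct reference is searched for in the
--     # sources at most once (memoized, short-circuiting on the first hit), instead
--     # of A's build-key-set / scan-all-keys-against-all-sources / set-difference passes.
--     sources = list(source_generator)
--     found_cache = {}
--     for item in checklist:
--         reference = item.get('reference')
--         if not reference:
--             continue
--         if reference not in found_cache:
--             found_cache[reference] = any(reference in content for content in sources)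
--         if not found_cache[reference]:
--             yield item
-- ===== Notes on version B (the rewrite author's own statement) =====
-- stated objective: faster
-- what changed: Instead of extracting a key set, scanning every key against every source and taking a set difference, B makes one pass over the checklist and checks each distinct reference against the sources at most once, memoized and short-circuiting at the first source that contains it.
import Mathlib
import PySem

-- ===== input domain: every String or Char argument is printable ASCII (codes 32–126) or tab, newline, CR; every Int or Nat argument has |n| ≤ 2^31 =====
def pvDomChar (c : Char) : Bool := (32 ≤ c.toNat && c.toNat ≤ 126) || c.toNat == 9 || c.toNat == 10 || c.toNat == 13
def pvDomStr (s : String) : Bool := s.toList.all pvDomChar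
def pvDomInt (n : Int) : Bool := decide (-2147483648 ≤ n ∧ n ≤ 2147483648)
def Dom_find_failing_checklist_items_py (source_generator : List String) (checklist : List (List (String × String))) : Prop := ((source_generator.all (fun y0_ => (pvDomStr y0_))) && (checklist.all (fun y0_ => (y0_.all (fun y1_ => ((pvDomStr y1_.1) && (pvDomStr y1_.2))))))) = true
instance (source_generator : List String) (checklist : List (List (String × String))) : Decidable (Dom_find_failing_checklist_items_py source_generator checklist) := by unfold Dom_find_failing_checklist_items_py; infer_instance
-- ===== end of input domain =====

-- B replaces A's three passes (extract key set, scan every key against every source,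
-- set difference) by one memoized pass over the checklist; return-value equivalence.

-- ===== PORT A =====
-- _extract_keys_from_checklist (yields collected into the set constructor's list)
def pvExtractKeys (checklist : List (List (String × String))) : List String :=
  checklist.foldl (fun acc item =>
    match PySem.Dict.get? (PySem.Dict.mk item) "reference" with
    | some key => if key = "" then acc else acc ++ [key]
    | none => acc) []

-- _find_keys_in_content: 'for key in checklist_keys: if key in content: yield key'
def pvFindKeysInContent (content : String) (checklist_keys : PySem.Set String) : List String :=
  checklist_keys.foldl (fun acc key =>
    if PySem.Str.isIn key content then acc ++ [key] else acc) []

-- _find_keys_in_sources: 'for content in source_generator: yield from …'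
def pvFindKeysInSources (source_generator : List String) (checklist_keys : PySem.Set String) : List String :=
  source_generator.foldl (fun acc content => acc ++ pvFindKeysInContent content checklist_keys) []

def find_failing_checklist_items_py (source_generator : List String) (checklist : List (List (String × String))) : List (List (String × String)) :=
  let checklist_keys : PySem.Set String := PySem.Set.ofList (pvExtractKeys checklist)
  let found_keys : PySem.Set String := PySem.Set.ofList (pvFindKeysInSources source_generator checklist_keys)
  let missing_keys : PySem.Set String := checklist_keys.diff found_keys
  checklist.foldl (fun acc item =>
    match PySem.Dict.get? (PySem.Dict.mk item) "reference" with
    | some reference =>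
        if reference = "" then acc
        else if PySem.Set.contains missing_keys reference then acc ++ [item] else acc
    | none => acc) []

-- ===== PORT B =====
-- any(reference in content for content in sources)  (short-circuiting)
def pvAnyContains (sources : List String) (reference : String) : Bool :=
  sources.any (fun content => PySem.Str.isIn reference content)

-- the single memoized pass of Source B
def pvAltLoop (sources : List String) (items : List (List (String × String)))
    (cache : PySem.Dict String Bool) (acc : List (List (String × String))) :
    List (List (String × String)) :=
  match items with
  | [] => acc
  | item :: rest =>
    match PySem.Dict.get? (PySem.Dict.mk item) "reference" with
    | none => pvAltLoop sources rest cache acc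
    | some reference =>
      if reference = "" then pvAltLoop sources rest cache acc
      else
        let cache' := if cache.contains reference then cache
                      else cache.insert reference (pvAnyContains sources reference)
        if cache'.getD reference false then pvAltLoop sources rest cache' acc
        else pvAltLoop sources rest cache' (acc ++ [item])

def find_failing_checklist_items_py_alt (source_generator : List String) (checklist : List (List (String × String))) : List (List (String × String)) :=
  pvAltLoop source_generator checklist PySem.Dict.empty []

-- ===== PRECONDITION & SPEC =====
def Spec_find_failing_checklist_items_py (source_generator : List String) (checklist : List (List (String × String))) (out : List (List (String × String))) : Prop := out = find_failing_checklist_items_py_alt source_generator checklist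
instance (source_generator : List String) (checklist : List (List (String × String))) (out : List (List (String × String))) : Decidable (Spec_find_failing_checklist_items_py source_generator checklist out) := by unfold Spec_find_failing_checklist_items_py; infer_instance

-- ===== CLAIM (what is proved, stated in full; the proofs are below) =====
def Claim_equal_find_failing_checklist_items_py : Prop := ∀ (source_generator : List String) (checklist : List (List (String × String))), Dom_find_failing_checklist_items_py source_generator checklist → Spec_find_failing_checklist_items_py source_generator checklist (find_failing_checklist_items_py source_generator checklist)


-- ===== LEMMAS AND PROOFS =====

-- the common reference point: items whose nonempty reference occurs in no source
def pvCanon (sources : List String) (checklist : List (List (String × String))) : List (List (String × String)) :=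
  checklist.filter (fun item =>
    match PySem.Dict.get? (PySem.Dict.mk item) "reference" with
    | some r => r ≠ "" && !pvAnyContains sources r
    | none => false)

theorem pv_extract_eq (checklist : List (List (String × String))) :
    pvExtractKeys checklist = checklist.flatMap (fun item =>
      match PySem.Dict.get? (PySem.Dict.mk item) "reference" with
      | some key => if key = "" then [] else [key]
      | none => []) := by
  unfold pvExtractKeys
  have hf : (fun (acc : List String) item =>
      match PySem.Dict.get? (PySem.Dict.mk item) "reference" with
      | some key => if key = "" then acc else acc ++ [key]
      | none => acc)
    = (fun (acc : List String) item => acc ++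
        match PySem.Dict.get? (PySem.Dict.mk item) "reference" with
        | some key => if key = "" then [] else [key]
        | none => []) := by
    funext acc item
    cases h : PySem.Dict.get? (PySem.Dict.mk item) "reference" with
    | none => simp
    | some key => by_cases hk : key = "" <;> simp [hk]
  rw [hf, PySem.List.foldl_append_eq_flatMap, List.nil_append]

-- membership characterisations for A's intermediate lists
theorem pv_mem_extract (checklist : List (List (String × String))) (r : String) :
    r ∈ pvExtractKeys checklist ↔
      ∃ item ∈ checklist, PySem.Dict.get? (PySem.Dict.mk item) "reference" = some r ∧ r ≠ "" := by
  rw [pv_extract_eq]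
  simp only [List.mem_flatMap]
  constructor
  · rintro ⟨item, hm, hr⟩
    refine ⟨item, hm, ?_⟩
    revert hr
    cases h : PySem.Dict.get? (PySem.Dict.mk item) "reference" with
    | none => simp
    | some key =>
      by_cases hk : key = "" <;> simp [hk]
      rintro rfl; exact ⟨rfl, hk⟩
  · rintro ⟨item, hm, hg, hne⟩
    exact ⟨item, hm, by simp [hg, hne]⟩

theorem pv_content_eq (content : String) (ck : PySem.Set String) :
    pvFindKeysInContent content ck = ck.filter (fun key => PySem.Str.isIn key content) := by
  unfold pvFindKeysInContent
  rw [PySem.List.foldl_append_if_eq_filter, List.nil_append]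

theorem pv_mem_found (sources : List String) (ck : PySem.Set String) (r : String) :
    r ∈ pvFindKeysInSources sources ck ↔ r ∈ ck ∧ pvAnyContains sources r = true := by
  unfold pvFindKeysInSources
  rw [PySem.List.foldl_append_eq_flatMap, List.nil_append]
  simp only [List.mem_flatMap, pv_content_eq, List.mem_filter, pvAnyContains, List.any_eq_true]
  aesop

-- A equals the canonical filter
theorem pvA_eq_canon (sources : List String) (checklist : List (List (String × String))) :
    find_failing_checklist_items_py sources checklist = pvCanon sources checklist := by
  simp only [find_failing_checklist_items_py, pvCanon]
  have hf : (fun (acc : List (List (String × String))) item =>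
      match PySem.Dict.get? (PySem.Dict.mk item) "reference" with
      | some reference =>
          if reference = "" then acc
          else if PySem.Set.contains ((PySem.Set.ofList (pvExtractKeys checklist)).diff
              (PySem.Set.ofList (pvFindKeysInSources sources (PySem.Set.ofList (pvExtractKeys checklist)))))
              reference then acc ++ [item] else acc
      | none => acc)
    = (fun acc item =>
        if (match PySem.Dict.get? (PySem.Dict.mk item) "reference" with
            | some reference =>
                reference ≠ "" && PySem.Set.contains ((PySem.Set.ofList (pvExtractKeys checklist)).diff
                  (PySem.Set.ofList (pvFindKeysInSources sources (PySem.Set.ofList (pvExtractKeys checklist)))))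
                  reference
            | none => false) = true then acc ++ [item] else acc) := by
    funext acc item
    cases h : PySem.Dict.get? (PySem.Dict.mk item) "reference" with
    | none => simp
    | some reference => by_cases hk : reference = "" <;> simp [hk]
  rw [hf, PySem.List.foldl_append_if_eq_filter, List.nil_append]
  apply List.filter_congr
  intro item hm
  cases h : PySem.Dict.get? (PySem.Dict.mk item) "reference" with
  | none => rfl
  | some r =>
    by_cases hk : r = ""
    · simp [hk]
    · have hck : r ∈ PySem.Set.ofList (pvExtractKeys checklist) := by
        rw [PySem.Set.mem_ofList, pv_mem_extract]
        exact ⟨item, hm, h, hk⟩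
      by_cases hany : pvAnyContains sources r = true
      · simp [hany]
        intro _ _
        exact (pv_mem_found sources (PySem.Set.ofList (pvExtractKeys checklist)) r).mpr ⟨hck, hany⟩
      · have hfalse : pvAnyContains sources r = false := by simpa using hany
        simp [hfalse]
        intro _
        refine ⟨(PySem.Set.mem_ofList (pvExtractKeys checklist) r).mp hck, fun hmem => ?_⟩
        have := ((pv_mem_found sources (PySem.Set.ofList (pvExtractKeys checklist)) r).mp hmem).2
        simp [hfalse] at this

-- B's loop with a correct cache extends acc by the canonical filter of the rest
theorem pvB_loop_eq (sources : List String) (items : List (List (String × String)))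
    (cache : PySem.Dict String Bool) (acc : List (List (String × String)))
    (hc : ∀ k b, cache.get? k = some b → b = pvAnyContains sources k) :
    pvAltLoop sources items cache acc = acc ++ pvCanon sources items := by
  induction items generalizing cache acc with
  | nil => simp [pvAltLoop, pvCanon]
  | cons item rest ih =>
    cases h : PySem.Dict.get? (PySem.Dict.mk item) "reference" with
    | none =>
      simp only [pvAltLoop, h]
      rw [ih cache acc hc]
      simp [pvCanon, h]
    | some r =>
      simp only [pvAltLoop, h]
      by_cases hk : r = ""
      · rw [if_pos hk, ih cache acc hc]
        simp [pvCanon, h, hk]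
      · rw [if_neg hk]
        by_cases hmem : cache.contains r = true
        · obtain ⟨b, hb⟩ : ∃ b, cache.get? r = some b := by
            rw [PySem.Dict.contains_eq_isSome_get?] at hmem
            exact Option.isSome_iff_exists.mp hmem
          have hbval : b = pvAnyContains sources r := hc r b hb
          rw [if_pos hmem, PySem.Dict.getD_of_get?_eq_some cache false hb, hbval]
          by_cases hany : pvAnyContains sources r = true
          · rw [if_pos hany, ih cache acc hc]
            simp [pvCanon, h, hk, hany]
          · have hfalse : pvAnyContains sources r = false := by simpa using hany
            rw [if_neg hany, ih cache (acc ++ [item]) hc]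
            simp [pvCanon, h, hk, hfalse]
        · have hinv : ∀ k b, (cache.insert r (pvAnyContains sources r)).get? k = some b →
              b = pvAnyContains sources k := by
            intro k b hkb
            rw [PySem.Dict.get?_insert] at hkb
            by_cases hkr : k = r
            · subst hkr
              rw [if_pos rfl] at hkb
              exact (Option.some.inj hkb).symm
            · rw [if_neg hkr] at hkb
              exact hc k b hkb
          rw [if_neg hmem,
            PySem.Dict.getD_of_get?_eq_some _ false (PySem.Dict.get?_insert_self cache r (pvAnyContains sources r))]
          by_cases hany : pvAnyContains sources r = true
          · rw [if_pos hany, ih _ acc hinv]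
            simp [pvCanon, h, hk, hany]
          · have hfalse : pvAnyContains sources r = false := by simpa using hany
            rw [if_neg hany, ih _ (acc ++ [item]) hinv]
            simp [pvCanon, h, hk, hfalse]

theorem pvB_eq_canon (sources : List String) (checklist : List (List (String × String))) :
    find_failing_checklist_items_py_alt sources checklist = pvCanon sources checklist := by
  unfold find_failing_checklist_items_py_alt
  rw [pvB_loop_eq sources checklist PySem.Dict.empty [] (by intro k b hb; simp [PySem.Dict.get?_empty] at hb), List.nil_append]

-- ===== VERDICT (by name: the statement is the Claim_ definition above) =====
theorem find_failing_checklist_items_py_spec : Claim_equal_find_failing_checklist_items_py := by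
  intro s c _
  unfold Spec_find_failing_checklist_items_py
  rw [pvA_eq_canon, pvB_eq_canon]
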